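-- pv_equiv track=rewrite | github.com/s32ol/jobs_ai | src/jobs_ai/source_seed_fast.py | classify_company_result
-- ===== SOURCE A (Python) =====
-- from collections.abc import Iterable, Sequence
--
-- def classify_company_result(
--     company_domain: str,
--     company_name: str | None,
--     attempted_candidates: Sequence[dict[str, object]],
-- ) -> tuple[str, str, str, str | None, str | None]:
--     confirmed = next((item for item in attempted_candidates if item["outcome"] == "confirmed"), None)
--     if confirmed is not None:
--         return (
--             "confirmed",
--             "confirmed_board_root",
--             f"confirmed {confirmed['portal_type']} board root",
--             confirmed["confirmed_root"],
--             None,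
--         )
--
--     manual_review_candidates = [item for item in attempted_candidates if item["outcome"] == "manual_review"]
--     if manual_review_candidates:
--         best = manual_review_candidates[0]
--         return (
--             "manual_review",
--             str(best["reason_code"]),
--             str(best["reason"]),
--             None,
--             (
--                 "Open the company site or the most plausible ATS candidate, confirm the real board root, "
--                 "then append it to ats_roots.txt before rerunning collect."
--             ),
--         )
--
--     if not attempted_candidates:
--         return (
--             "skipped",
--             "no_candidate_urls",
--             f"no ATS slug candidates were generated for {company_domain}",
--             None,
--             "Review the company name/domain manually and add a supported Greenhouse, Lever, or Ashby root if you find one.",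
--         )
--
--     return (
--         "skipped",
--         "no_confirmed_candidates",
--         (
--             f"no supported ATS board root was confirmed from {len(attempted_candidates)} deterministic candidate URL(s) "
--             f"for {company_name or company_domain}"
--         ),
--         None,
--         "Skip for now or confirm the company's Greenhouse, Lever, or Ashby slug manually before collecting.",
--     )
-- ===== SOURCE B (Python) =====
-- def _decide(attempted_candidates):
--     """Single short-circuiting pass: returns a small decision tag instead of the final tuple."""
--     first_manual = None
--     seen = 0
--     for item in attempted_candidates:
--         outcome = item["outcome"]
--         if outcome == "confirmed":
--             return ("confirmed", item)
--         if outcome == "manual_review" and first_manual is None: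
--             first_manual = item
--         seen += 1
--     if first_manual is not None:
--         return ("manual", first_manual)
--     if seen == 0:
--         return ("empty", None)
--     return ("none", seen)
--
--
-- def classify_company_result(company_domain, company_name, attempted_candidates):
--     tag, payload = _decide(attempted_candidates)
--     if tag == "confirmed":
--         return (
--             "confirmed",
--             "confirmed_board_root",
--             f"confirmed {payload['portal_type']} board root",
--             payload["confirmed_root"],
--             None,
--         )
--     if tag == "manual":
--         return (
--             "manual_review",
--             str(payload["reason_code"]),
--             str(payload["reason"]),
--             None,
--             (
--                 "Open the company site or the most plausible ATS candidate, confirm the real board root, "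
--                 "then append it to ats_roots.txt before rerunning collect."
--             ),
--         )
--     if tag == "empty":
--         return (
--             "skipped",
--             "no_candidate_urls",
--             f"no ATS slug candidates were generated for {company_domain}",
--             None,
--             "Review the company name/domain manually and add a supported Greenhouse, Lever, or Ashby root if you find one.",
--         )
--     return (
--         "skipped",
--         "no_confirmed_candidates",
--         (
--             f"no supported ATS board root was confirmed from {payload} deterministic candidate URL(s) "
--             f"for {company_name or company_domain}"
--         ),
--         None,
--         "Skip for now or confirm the company's Greenhouse, Lever, or Ashby slug manually before collecting.",
--     )
-- ===== Notes on version B (the rewrite author's own statement) =====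
-- stated objective: alternative
-- what changed: Replaces A's two staged scans (next() for a confirmed item plus a comprehension collecting manual_review items) with a decide/render decomposition: one short-circuiting pass computes a small decision tag (confirmed item / first manual item / empty / count), and a separate render step builds the tuple from the tag.
import Mathlib
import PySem

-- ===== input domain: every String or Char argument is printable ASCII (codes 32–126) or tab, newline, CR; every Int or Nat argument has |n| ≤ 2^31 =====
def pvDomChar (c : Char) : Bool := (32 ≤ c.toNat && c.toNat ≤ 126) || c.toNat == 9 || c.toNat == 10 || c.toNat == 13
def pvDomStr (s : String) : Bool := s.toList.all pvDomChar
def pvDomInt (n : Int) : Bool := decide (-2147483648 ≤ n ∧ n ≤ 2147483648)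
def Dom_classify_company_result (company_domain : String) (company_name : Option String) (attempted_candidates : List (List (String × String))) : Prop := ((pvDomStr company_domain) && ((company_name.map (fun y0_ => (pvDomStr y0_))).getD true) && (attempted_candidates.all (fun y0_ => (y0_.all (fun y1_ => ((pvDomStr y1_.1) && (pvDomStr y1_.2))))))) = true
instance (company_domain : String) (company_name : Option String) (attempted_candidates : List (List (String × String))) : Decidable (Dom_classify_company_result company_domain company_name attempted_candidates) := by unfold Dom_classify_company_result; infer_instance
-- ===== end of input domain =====

-- B replaces A's two staged scans (next() for confirmed + a comprehension for manual_review) with a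
-- decide/render split: one short-circuiting pass yields a decision tag, a separate step renders the tuple.


-- Python dict lookup on a string-valued association list (first match)
def pvGet (d : List (String × String)) (k : String) : Option String :=
  (d.find? (fun p => p.1 == k)).map Prod.snd

def pvGetD (d : List (String × String)) (k : String) (dflt : String) : String :=
  (pvGet d k).getD dflt

-- ===== PORT A =====
-- next(...) → List.find?; the manual_review comprehension → List.filter, then [0] → head?
def classify_company_result (company_domain : String) (company_name : Option String) (attempted_candidates : List (List (String × String))) : String × String × String × Option String × Option String :=
  match attempted_candidates.find? (fun d => pvGetD d "outcome" "" == "confirmed") with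
  | some confirmed =>
    ("confirmed", "confirmed_board_root",
     "confirmed " ++ pvGetD confirmed "portal_type" "" ++ " board root",
     pvGet confirmed "confirmed_root", none)
  | none =>
    match (attempted_candidates.filter (fun d => pvGetD d "outcome" "" == "manual_review")).head? with
    | some best =>
      ("manual_review", pvGetD best "reason_code" "", pvGetD best "reason" "", none,
       some "Open the company site or the most plausible ATS candidate, confirm the real board root, then append it to ats_roots.txt before rerunning collect.")
    | none =>
      if attempted_candidates.isEmpty then
        ("skipped", "no_candidate_urls",
         "no ATS slug candidates were generated for " ++ company_domain, none,
         some "Review the company name/domain manually and add a supported Greenhouse, Lever, or Ashby root if you find one.")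
      else
        ("skipped", "no_confirmed_candidates",
         "no supported ATS board root was confirmed from " ++ PySem.Int.toStr (attempted_candidates.length : Int) ++
           " deterministic candidate URL(s) for " ++
           (match company_name with
            | some s => if s == "" then company_domain else s
            | none => company_domain),
         none,
         some "Skip for now or confirm the company's Greenhouse, Lever, or Ashby slug manually before collecting.")

-- ===== PORT B =====
-- Source B's `_decide`: a decision tag computed by one short-circuiting pass
inductive PvDecision
  | confirmedD : List (String × String) → PvDecision
  | manualD : List (String × String) → PvDecision
  | emptyD : PvDecision
  | noneD : Nat → PvDecision
deriving DecidableEq, Repr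

def pvDecide : List (List (String × String)) → Option (List (String × String)) → Nat → PvDecision
  | [], firstManual, seen =>
    match firstManual with
    | some b => .manualD b
    | none => if seen = 0 then .emptyD else .noneD seen
  | item :: rest, firstManual, seen =>
    let outcome := pvGetD item "outcome" ""
    if outcome == "confirmed" then .confirmedD item
    else pvDecide rest
      (if outcome == "manual_review" && firstManual.isNone then some item else firstManual)
      (seen + 1)

-- Source B's render step
def pvRender (company_domain : String) (company_name : Option String) : PvDecision → String × String × String × Option String × Option String
  | .confirmedD payload =>
    ("confirmed", "confirmed_board_root",
     "confirmed " ++ pvGetD payload "portal_type" "" ++ " board root",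
     pvGet payload "confirmed_root", none)
  | .manualD payload =>
    ("manual_review", pvGetD payload "reason_code" "", pvGetD payload "reason" "", none,
     some "Open the company site or the most plausible ATS candidate, confirm the real board root, then append it to ats_roots.txt before rerunning collect.")
  | .emptyD =>
    ("skipped", "no_candidate_urls",
     "no ATS slug candidates were generated for " ++ company_domain, none,
     some "Review the company name/domain manually and add a supported Greenhouse, Lever, or Ashby root if you find one.")
  | .noneD seen =>
    ("skipped", "no_confirmed_candidates",
     "no supported ATS board root was confirmed from " ++ PySem.Int.toStr (seen : Int) ++
       " deterministic candidate URL(s) for " ++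
       (match company_name with
        | some s => if s == "" then company_domain else s
        | none => company_domain),
     none,
     some "Skip for now or confirm the company's Greenhouse, Lever, or Ashby slug manually before collecting.")

def classify_company_result_alt (company_domain : String) (company_name : Option String) (attempted_candidates : List (List (String × String))) : String × String × String × Option String × Option String :=
  pvRender company_domain company_name (pvDecide attempted_candidates none 0)

-- ===== PRECONDITION & SPEC =====
def pvHasKey (d : List (String × String)) (k : String) : Bool := (pvGet d k).isSome

def pvConfOk : Option (List (String × String)) → Bool
  | some d => pvHasKey d "portal_type" && pvHasKey d "confirmed_root"
  | none => false

-- Pre_ excludes exactly the inputs where Python A raises KeyError: an item missing "outcome" reached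
-- before any confirmed item, a confirmed item missing "portal_type"/"confirmed_root", or (with no
-- confirmed item) a first manual_review item missing "reason_code"/"reason".
def pvPreB (l : List (List (String × String))) : Bool :=
  match l.findIdx? (fun d => !pvHasKey d "outcome"),
        l.findIdx? (fun d => pvGetD d "outcome" "" == "confirmed") with
  | some b, some c => decide (c < b) && pvConfOk l[c]?
  | none, some c => pvConfOk l[c]?
  | some _, none => false
  | none, none =>
    match l.find? (fun d => pvGetD d "outcome" "" == "manual_review") with
    | some d => pvHasKey d "reason_code" && pvHasKey d "reason"
    | none => true

def Pre_classify_company_result (company_domain : String) (company_name : Option String) (attempted_candidates : List (List (String × String))) : Prop :=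
  pvPreB attempted_candidates = true

instance (company_domain : String) (company_name : Option String) (attempted_candidates : List (List (String × String))) : Decidable (Pre_classify_company_result company_domain company_name attempted_candidates) := by
  unfold Pre_classify_company_result; infer_instance

def pvWitness_classify_company_result : String × Option String × (List (List (String × String))) :=
  ("acme.com", some "Acme",
   [[("outcome", "manual_review"), ("reason_code", "ambiguous"), ("reason", "two roots")],
    [("outcome", "confirmed"), ("portal_type", "greenhouse"), ("confirmed_root", "https://boards.greenhouse.io/acme")]])

def Spec_classify_company_result (company_domain : String) (company_name : Option String) (attempted_candidates : List (List (String × String))) (out : String × String × String × Option String × Option String) : Prop := out = classify_company_result_alt company_domain company_name attempted_candidates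
instance (company_domain : String) (company_name : Option String) (attempted_candidates : List (List (String × String))) (out : String × String × String × Option String × Option String) : Decidable (Spec_classify_company_result company_domain company_name attempted_candidates out) := by unfold Spec_classify_company_result; infer_instance

-- ===== CLAIM =====
def Claim_equal_classify_company_result : Prop := ∀ (company_domain : String) (company_name : Option String) (attempted_candidates : List (List (String × String))), Dom_classify_company_result company_domain company_name attempted_candidates → Pre_classify_company_result company_domain company_name attempted_candidates → Spec_classify_company_result company_domain company_name attempted_candidates (classify_company_result company_domain company_name attempted_candidates)

-- ===== LEMMAS AND PROOFS =====

-- characterisation of B's decision pass: first confirmed wins; otherwise the pending/first manual item;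
-- otherwise empty/count, where the count at the end is seen + remaining length
theorem pvDecide_eq (l : List (List (String × String)))
    (fm : Option (List (String × String))) (seen : Nat) :
    pvDecide l fm seen =
      match l.find? (fun d => pvGetD d "outcome" "" == "confirmed") with
      | some c => .confirmedD c
      | none =>
        match fm.or (l.find? (fun d => pvGetD d "outcome" "" == "manual_review")) with
        | some best => .manualD best
        | none =>
          if seen + l.length = 0 then .emptyD else .noneD (seen + l.length) := by
  induction l generalizing fm seen with
  | nil => cases fm <;> simp [pvDecide]
  | cons item rest ih =>
    by_cases hc : pvGetD item "outcome" "" == "confirmed"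
    · simp [pvDecide, List.find?, hc]
    · cases fm with
      | some b =>
        simp [pvDecide, List.find?, hc, ih]
      | none =>
        by_cases hm : pvGetD item "outcome" "" == "manual_review"
        · simp [pvDecide, List.find?, hc, hm, ih]
        · simp [pvDecide, List.find?, hc, hm, ih, Nat.add_comm, Nat.add_left_comm]

theorem head?_filter_eq_find? (p : List (String × String) → Bool) (l : List (List (String × String))) :
    (l.filter p).head? = l.find? p := by
  induction l with
  | nil => rfl
  | cons x xs ih =>
    by_cases h : p x <;> simp [List.filter, List.find?, h, ih]

-- ===== VERDICT =====
theorem classify_company_result_spec : Claim_equal_classify_company_result := by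
  intro cd cn l _ _
  unfold Spec_classify_company_result classify_company_result classify_company_result_alt
  rw [pvDecide_eq, head?_filter_eq_find?]
  cases hfc : l.find? (fun d => pvGetD d "outcome" "" == "confirmed") with
  | some c => simp [pvRender]
  | none =>
    cases hfm : l.find? (fun d => pvGetD d "outcome" "" == "manual_review") with
    | some b => simp [pvRender]
    | none =>
      cases l with
      | nil => simp [pvRender]
      | cons x xs => simp [pvRender]
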